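-- pv_equiv track=rewrite | github.com/jjinyeok/this_is_coding_test | greedy_4.py | solution
-- ===== SOURCE A (Python) =====
-- def solution(n, k):
--     answer = 0
--     while n != 1:
--         if n % k == 0:
--             n //= k
--         else:
--             n -= 1
--         answer += 1
--     return answer
-- ===== SOURCE B (Python) =====
-- def solution(n, k):
--     if n < k:
--         return n - 1
--     return n % k + 1 + solution(n // k, k)
-- ===== Notes on version B (the rewrite author's own statement) =====
-- stated objective: faster
-- what changed: Replaces A's iterative one-step-at-a-time loop with an accumulator by a short non-tail recursion on n//k: each level contributes n % k + 1 steps (jump to the multiple of k, then divide), and the base case n < k contributes the final n - 1 decrements, giving O(log_k n) arithmetic operations instead of O(n) iterations.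
-- outside the precondition, e.g. on solution(-5, -2): A returns 6, B returns -6
import Mathlib
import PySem

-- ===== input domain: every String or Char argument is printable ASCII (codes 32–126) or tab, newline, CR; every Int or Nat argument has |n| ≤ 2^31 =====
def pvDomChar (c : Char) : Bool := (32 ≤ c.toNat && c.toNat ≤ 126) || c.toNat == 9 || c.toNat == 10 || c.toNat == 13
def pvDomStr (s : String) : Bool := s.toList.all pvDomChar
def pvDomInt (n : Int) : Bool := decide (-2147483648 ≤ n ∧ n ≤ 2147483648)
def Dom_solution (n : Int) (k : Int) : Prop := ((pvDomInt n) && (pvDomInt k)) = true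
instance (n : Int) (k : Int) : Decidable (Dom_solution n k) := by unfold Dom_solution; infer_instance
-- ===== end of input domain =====

-- B replaces A's one-step-at-a-time counting loop by a non-tail recursion on n // k
-- (each level adds n % k + 1; base case n < k adds n - 1): O(log n) instead of O(n).


-- ===== PORT A =====
-- while n != 1: divide by k when divisible else subtract 1, counting steps in 'answer'.
-- Fuel only makes the loop total; n.toNat + 1 iterations suffice on Pre_ (n strictly decreases).
def solLoopA : Nat → Int → Int → Int → Int
  | 0, _, _, answer => answer
  | fuel + 1, n, k, answer =>
    if n ≠ 1 then
      (if PySem.Int.mod n k = 0 then solLoopA fuel (PySem.Int.floordiv n k) k (answer + 1)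
       else solLoopA fuel (n - 1) k (answer + 1))
    else answer

def solution (n : Int) (k : Int) : Int := solLoopA (n.toNat + 1) n k 0

-- ===== PORT B =====
-- if n < k: return n - 1; else return n % k + 1 + solution(n // k, k).
-- Fuel makes the recursion total; depth ≤ n.toNat + 1 on Pre_.
def solRecB : Nat → Int → Int → Int
  | 0, n, _ => n - 1
  | fuel + 1, n, k =>
    if n < k then n - 1
    else PySem.Int.mod n k + 1 + solRecB fuel (PySem.Int.floordiv n k) k

def solution_alt (n : Int) (k : Int) : Int := solRecB (n.toNat + 1) n k

-- ===== PRECONDITION & SPEC =====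
-- Pre_ restricts to the problem's natural domain 1 ≤ n, 2 ≤ k: outside it A diverges
-- (k ∈ {0,1}, or n ≤ 0 with 0 ≤ k) or, for negative k, both programs' step counts through
-- negative intermediates are implementation accidents no caller would specify.
def Pre_solution (n : Int) (k : Int) : Prop := 1 ≤ n ∧ 2 ≤ k
instance (n : Int) (k : Int) : Decidable (Pre_solution n k) := by unfold Pre_solution; infer_instance
def pvWitness_solution : Int × Int := (10, 3)
def Spec_solution (n : Int) (k : Int) (out : Int) : Prop := out = solution_alt n k
instance (n : Int) (k : Int) (out : Int) : Decidable (Spec_solution n k out) := by unfold Spec_solution; infer_instance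

-- ===== CLAIM (what is proved, stated in full; the proofs are below) =====
def Claim_equal_solution : Prop := ∀ (n : Int) (k : Int), Dom_solution n k → Pre_solution n k → Spec_solution n k (solution n k)

-- ===== LEMMAS AND PROOFS =====

-- For k ∤ n (2 ≤ k): (n-1) // k = n // k and (n-1) % k = n % k - 1.
theorem floordiv_pred (n k : Int) (hk : 2 ≤ k) (hr : PySem.Int.mod n k ≠ 0) :
    PySem.Int.floordiv (n - 1) k = PySem.Int.floordiv n k ∧
    PySem.Int.mod (n - 1) k = PySem.Int.mod n k - 1 := by
  have hqk := PySem.Int.floordiv_mul_add_mod n k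
  have hr0 : 0 ≤ PySem.Int.mod n k := PySem.Int.mod_nonneg n (by omega)
  have hrk : PySem.Int.mod n k < k := PySem.Int.mod_lt n (by omega)
  have hr1 : 0 < PySem.Int.mod n k := hr0.lt_of_ne (Ne.symm hr)
  have hq : PySem.Int.floordiv (n - 1) k = PySem.Int.floordiv n k := by
    rw [PySem.Int.floordiv_eq_iff_of_pos (by omega : (0:Int) < k)]
    constructor
    · linarith
    · have : (PySem.Int.floordiv n k + 1) * k = PySem.Int.floordiv n k * k + k := by ring
      rw [this]; linarith
  refine ⟨hq, ?_⟩
  have hqk' := PySem.Int.floordiv_mul_add_mod (n - 1) k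
  rw [hq] at hqk'
  linarith

-- Main equivalence: A's counting loop equals a plus B's recursion, by strong induction on n.
theorem loop_eq (k : Int) (hk : 2 ≤ k) (m : Nat) :
    ∀ (n a : Int) (fa fb : Nat), 1 ≤ n → n.toNat = m → m ≤ fa + 1 → m ≤ fb + 1 →
      solLoopA fa n k a = a + solRecB fb n k := by
  induction m using Nat.strong_induction_on with
  | _ m ih =>
    intro n a fa fb hn hm hfa hfb
    by_cases h1 : n = 1
    · subst h1
      have hA : solLoopA fa 1 k a = a := by
        cases fa with
        | zero => rfl
        | succ fa' => simp [solLoopA]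
      have hB : solRecB fb 1 k = 0 := by
        cases fb with
        | zero => rfl
        | succ fb' => simp [solRecB]; omega
      rw [hA, hB]; ring
    · have hn2 : 2 ≤ n := by omega
      have hm2 : 2 ≤ m := by omega
      cases fa with
      | zero => omega
      | succ fa' =>
      cases fb with
      | zero => omega
      | succ fb' =>
      simp only [solLoopA, if_pos h1]
      by_cases hmod : PySem.Int.mod n k = 0
      · -- divide step of A; B's remainder term is zero
        have hdvd : k ∣ n := (PySem.Int.mod_eq_zero_iff_dvd n k).mp hmod
        have hnk : k ≤ n := Int.le_of_dvd (by omega) hdvd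
        have hqk := PySem.Int.floordiv_mul_add_mod n k
        rw [hmod] at hqk
        have hq1 : 1 ≤ PySem.Int.floordiv n k := by nlinarith
        have hqn : PySem.Int.floordiv n k < n := by nlinarith
        rw [if_pos hmod]
        rw [ih (PySem.Int.floordiv n k).toNat (by omega) (PySem.Int.floordiv n k)
          (a + 1) fa' fb' hq1 rfl (by omega) (by omega)]
        simp only [solRecB, if_neg (by omega : ¬ n < k), hmod]
        ring
      · -- subtract step of A
        rw [if_neg hmod]
        have hne : n ≠ k := by
          intro h; subst h
          exact hmod ((PySem.Int.mod_eq_zero_iff_dvd n n).mpr dvd_rfl)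
        rw [ih (n - 1).toNat (by omega) (n - 1) (a + 1) fa' (fb' + 1)
          (by omega) rfl (by omega) (by omega)]
        rcases lt_or_gt_of_ne hne with hlt | hgt
        · -- n < k: both recursions are in the base case
          have hB1 : solRecB (fb' + 1) (n - 1) k = n - 2 := by
            simp only [solRecB, if_pos (by omega : n - 1 < k)]; ring
          have hB2 : solRecB (fb' + 1) n k = n - 1 := by
            simp only [solRecB, if_pos hlt]
          rw [hB1, hB2]; ring
        · -- k < n: unfold one level of B on n - 1 and on n
          obtain ⟨hq, hr⟩ := floordiv_pred n k hk hmod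
          have hr1 : 1 ≤ PySem.Int.mod n k := by
            have := PySem.Int.mod_nonneg n (show 0 < k by omega)
            omega
          simp only [solRecB, if_neg (by omega : ¬ n - 1 < k), if_neg (by omega : ¬ n < k),
            hq, hr]
          ring

-- ===== VERDICT (by name: the statement is the Claim_ definition above) =====
theorem solution_spec : Claim_equal_solution := by
  intro n k _om hpre
  obtain ⟨hn, hk⟩ := hpre
  unfold Spec_solution solution solution_alt
  have := loop_eq k hk n.toNat n 0 (n.toNat + 1) (n.toNat + 1) hn rfl (by omega) (by omega)
  simpa using this
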